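-- pv_equiv track=rewrite | github.com/yabozj/tiling | makeyourday.py | find_all_placements
-- ===== SOURCE A (Python) =====
-- board=[ \
--     "********",
-- 	"********",
-- 	"********",
-- 	"********",
-- 	"********",
-- 	"********",
--     "***     "]
--
-- board_height=len(board)
--
-- board_width=len(board[0])
--
-- def can_be_placed(into, irow, icol, tile):
--     rt=[]
--     tile_height=len(tile)
--     tile_width=len(tile[0])
--     for prow in range(tile_height):
--         for pcol in range(tile_width):
--             if tile[prow][pcol]=='*':
--                 # tile cannot be placed if there is a hole on board:
--                 if into[irow+prow][icol+pcol]==' ':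
--                     return None
--                 if into[irow+prow][icol+pcol]=='*':
--                     rt.append((irow+prow, icol+pcol))
--     return rt
--
-- def find_all_placements(_type, tile):
--     tile_height=len(tile)
--     tile_width=len(tile[0])
--     rt=[]
--
--     for row in range(board_height-tile_height+1):
--         for col in range(board_width-tile_width+1):
--             tmp=can_be_placed(board, row, col, tile)
--             if tmp!=None:
--                 rt.append((_type, tmp))
-- # rt is a list of tuples, each has poly type and list of coordinates, like:
-- #(0, [(0, 1), (1, 1), (1, 2), (2, 1)]),
-- #(0, [(0, 2), (1, 2), (1, 3), (2, 2)]),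
-- #...
-- #(1, [(0, 1), (0, 2), (1, 1), (1, 2), (2, 1)]),
-- #(1, [(0, 2), (0, 3), (1, 2), (1, 3), (2, 2)])
--
--     return rt
-- ===== SOURCE B (Python) =====
-- board=[ \
--     "********",
-- 	"********",
-- 	"********",
-- 	"********",
-- 	"********",
-- 	"********",
--     "***     "]
--
-- board_height=len(board)
--
-- board_width=len(board[0])
--
-- def find_all_placements(_type, tile):
--     th = len(tile)
--     tw = len(tile[0])
--     # one scan of the tile: star offsets (row-major), then one hole set for the board
--     offsets = [(pr, pc) for pr in range(th) for pc in range(tw) if tile[pr][pc] == '*']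
--     holes = {(r, c) for r, rowstr in enumerate(board) for c, ch in enumerate(rowstr) if ch == ' '}
--     out = []
--     for row in range(board_height - th + 1):
--         for col in range(board_width - tw + 1):
--             cells = [(row + pr, col + pc) for pr, pc in offsets]
--             if holes.isdisjoint(cells):
--                 out.append((_type, cells))
--     return out
-- ===== Notes on version B (the rewrite author's own statement) =====
-- stated objective: alternative
-- what changed: B scans the tile once to extract its star-offset list and builds the board's hole set once, then tests each placement by translating the offsets and checking disjointness with the hole set, instead of A's per-position rescan of the whole tile against the board via can_be_placed.
-- outside the precondition, e.g. on find_all_placements(0, ['**', '*', '*', '*', '*', '*', '*', '*']): A returns [], B raises IndexError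
import Mathlib
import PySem

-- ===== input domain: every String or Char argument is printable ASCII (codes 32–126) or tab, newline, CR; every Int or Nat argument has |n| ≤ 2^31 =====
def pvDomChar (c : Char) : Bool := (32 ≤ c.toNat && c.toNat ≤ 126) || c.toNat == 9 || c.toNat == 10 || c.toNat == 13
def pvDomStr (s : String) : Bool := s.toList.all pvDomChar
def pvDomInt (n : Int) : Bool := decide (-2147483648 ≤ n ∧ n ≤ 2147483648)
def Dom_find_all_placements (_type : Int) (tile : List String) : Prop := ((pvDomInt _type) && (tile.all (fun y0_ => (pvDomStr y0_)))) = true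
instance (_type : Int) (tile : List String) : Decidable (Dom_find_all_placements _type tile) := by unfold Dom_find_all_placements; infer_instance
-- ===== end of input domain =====

-- B replaces A's per-position rescan of the tile (can_be_placed) by a once-computed
-- star-offset list and a once-computed hole set, testing each placement by translation
-- and set-disjointness; equality is proved on non-ragged tiles (Pre_).

-- ===== PORT A =====
def pvBoard : List String :=
  ["********", "********", "********", "********", "********", "********", "***     "]

def pvBoardHeight : Int := PySem.List.len pvBoard

def pvBoardWidth : Int := PySem.Str.len ((PySem.List.pyGet? pvBoard 0).getD "")

-- xs[r][c] for a list of strings; the `getD ""` default is never reached inside Pre_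
def pvCell (xs : List String) (r c : Int) : Option Char :=
  PySem.Str.pyGet? ((PySem.List.pyGet? xs r).getD "") c

-- inner 'for pcol in range(tile_width)' loop of can_be_placed (early 'return None' as Option)
def cbpInner (into : List String) (irow icol prow : Int) (tile : List String) :
    List Int → List (Int × Int) → Option (List (Int × Int))
  | [], rt => some rt
  | pcol :: rest, rt =>
    if pvCell tile prow pcol = some '*' then
      if pvCell into (irow + prow) (icol + pcol) = some ' ' then none
      else if pvCell into (irow + prow) (icol + pcol) = some '*' then
        cbpInner into irow icol prow tile rest (rt ++ [(irow + prow, icol + pcol)])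
      else cbpInner into irow icol prow tile rest rt
    else cbpInner into irow icol prow tile rest rt

-- outer 'for prow in range(tile_height)' loop of can_be_placed
def cbpRows (into : List String) (irow icol : Int) (tile : List String) (tw : Int) :
    List Int → List (Int × Int) → Option (List (Int × Int))
  | [], rt => some rt
  | prow :: rest, rt =>
    match cbpInner into irow icol prow tile (PySem.List.pyRange 0 tw 1) rt with
    | none => none
    | some rt' => cbpRows into irow icol tile tw rest rt'

def can_be_placed (into : List String) (irow icol : Int) (tile : List String) :
    Option (List (Int × Int)) :=
  let tile_height : Int := PySem.List.len tile
  let tile_width : Int := PySem.Str.len ((PySem.List.pyGet? tile 0).getD "")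
  cbpRows into irow icol tile tile_width (PySem.List.pyRange 0 tile_height 1) []

def find_all_placements (_type : Int) (tile : List String) : List (Int × (List (Int × Int))) :=
  let tile_height : Int := PySem.List.len tile
  let tile_width : Int := PySem.Str.len ((PySem.List.pyGet? tile 0).getD "")
  (PySem.List.pyRange 0 (pvBoardHeight - tile_height + 1) 1).foldl (fun rt row =>
    (PySem.List.pyRange 0 (pvBoardWidth - tile_width + 1) 1).foldl (fun rt col =>
      match can_be_placed pvBoard row col tile with
      | none => rt
      | some tmp => rt ++ [(_type, tmp)]) rt) []

-- ===== PORT B =====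
-- holes = {(r, c) for r, rowstr in enumerate(board) for c, ch in enumerate(rowstr) if ch == ' '}
def pvHoles : PySem.Set (Int × Int) :=
  PySem.Set.ofList ((PySem.List.enumerate pvBoard 0).flatMap (fun p =>
    ((PySem.List.enumerate p.2.toList 0).filter (fun q => q.2 == ' ')).map (fun q => (p.1, q.1))))

-- offsets = [(pr, pc) for pr in range(th) for pc in range(tw) if tile[pr][pc] == '*']
def pvOffsets (tile : List String) (th tw : Int) : List (Int × Int) :=
  (PySem.List.pyRange 0 th 1).flatMap (fun pr =>
    ((PySem.List.pyRange 0 tw 1).filter (fun pc => pvCell tile pr pc == some '*')).map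
      (fun pc => (pr, pc)))

def find_all_placements_alt (_type : Int) (tile : List String) : List (Int × (List (Int × Int))) :=
  let th : Int := PySem.List.len tile
  let tw : Int := PySem.Str.len ((PySem.List.pyGet? tile 0).getD "")
  let offsets := pvOffsets tile th tw
  (PySem.List.pyRange 0 (pvBoardHeight - th + 1) 1).foldl (fun out row =>
    (PySem.List.pyRange 0 (pvBoardWidth - tw + 1) 1).foldl (fun out col =>
      let cells := offsets.map (fun o => (row + o.1, col + o.2))
      if PySem.Set.isdisjoint pvHoles cells then out ++ [(_type, cells)] else out) out) []

-- ===== PRECONDITION & SPEC =====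
-- Pre_ excludes the empty tile (A raises IndexError on tile[0]) and ragged tiles — a row
-- shorter than the first row — on which A raises IndexError or, when its loops never reach
-- the short row, accidentally returns [] while B's up-front offset scan raises.
def Pre_find_all_placements (_type : Int) (tile : List String) : Prop :=
  tile ≠ [] ∧ ∀ s ∈ tile, PySem.Str.len (tile.headD "") ≤ PySem.Str.len s
instance (_type : Int) (tile : List String) : Decidable (Pre_find_all_placements _type tile) := by
  unfold Pre_find_all_placements; infer_instance

def pvWitness_find_all_placements : Int × List String := (0, ["**", " *", "**"])

def Spec_find_all_placements (_type : Int) (tile : List String)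
    (out : List (Int × (List (Int × Int)))) : Prop := out = find_all_placements_alt _type tile
instance (_type : Int) (tile : List String) (out : List (Int × (List (Int × Int)))) :
    Decidable (Spec_find_all_placements _type tile out) := by
  unfold Spec_find_all_placements; infer_instance

-- ===== CLAIM (what is proved, stated in full; the proofs are below) =====
def Claim_equal_find_all_placements : Prop := ∀ (_type : Int) (tile : List String),
  Dom_find_all_placements _type tile → Pre_find_all_placements _type tile →
  Spec_find_all_placements _type tile (find_all_placements _type tile)


-- ===== LEMMAS AND PROOFS =====

-- a board cell inside the 7x8 rectangle is ' ' exactly on the hole positions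
def pvHoleB (q : Int × Int) : Bool := decide (q.1 = 6 ∧ 3 ≤ q.2)

lemma pv_board_cell (r c : Int) (hr0 : 0 ≤ r) (hr : r < 7) (hc0 : 0 ≤ c) (hc : c < 8) :
    pvCell pvBoard r c = some (if pvHoleB (r, c) then ' ' else '*') := by
  lift r to Nat using hr0 with a
  lift c to Nat using hc0 with b
  have ha : a < 7 := by exact_mod_cast hr
  have hb : b < 8 := by exact_mod_cast hc
  interval_cases a <;> interval_cases b <;> decide

lemma pv_holes_eval : pvHoles = [(6, 3), (6, 4), (6, 5), (6, 6), (6, 7)] := by decide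

lemma pv_mem_holes (q : Int × Int) : q ∈ pvHoles ↔ q.1 = 6 ∧ 3 ≤ q.2 ∧ q.2 ≤ 7 := by
  obtain ⟨x, y⟩ := q
  rw [pv_holes_eval]
  simp only [List.mem_cons, List.not_mem_nil, or_false, Prod.mk.injEq]
  constructor
  · rintro (⟨h1, h2⟩ | ⟨h1, h2⟩ | ⟨h1, h2⟩ | ⟨h1, h2⟩ | ⟨h1, h2⟩) <;> subst h1 <;> subst h2 <;> simp
  · rintro ⟨h1, h2, h3⟩; subst h1; omega

-- star cells of one tile row, translated to the board, from column offset a on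
def pvRowCells (tile : List String) (row col prow tw a : Int) : List (Int × Int) :=
  ((PySem.List.pyRange a tw 1).filter (fun pc => pvCell tile prow pc == some '*')).map
    (fun pc => (row + prow, col + pc))

-- does some star of this tile row (from offset a on) land on a hole?
def pvRowBad (tile : List String) (row col prow tw a : Int) : Bool :=
  (PySem.List.pyRange a tw 1).any (fun pc =>
    pvCell tile prow pc == some '*' && pvHoleB (row + prow, col + pc))

lemma pv_inner (tile : List String) (row col prow tw : Int)
    (hr0 : 0 ≤ row + prow) (hr : row + prow < 7) (hc0 : 0 ≤ col) (hcw : col + tw ≤ 8) :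
    ∀ (n : Nat) (a : Int) (rt : List (Int × Int)), 0 ≤ a → (tw - a).toNat = n →
    cbpInner pvBoard row col prow tile (PySem.List.pyRange a tw 1) rt =
      if pvRowBad tile row col prow tw a then none
      else some (rt ++ pvRowCells tile row col prow tw a) := by
  intro n
  induction n with
  | zero =>
    intro a rt ha h0
    have hle : tw ≤ a := by omega
    simp [cbpInner, pvRowBad, pvRowCells, PySem.List.pyRange_one_eq_nil hle]
  | succ n ih =>
    intro a rt ha hn
    have hlt : a < tw := by omega
    have hca : col + a < 8 := by omega
    have hca0 : (0:Int) ≤ col + a := by omega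
    have hcell := pv_board_cell (row + prow) (col + a) hr0 hr hca0 hca
    rw [PySem.List.pyRange_one_cons hlt]
    unfold pvRowBad pvRowCells
    rw [PySem.List.pyRange_one_cons hlt]
    by_cases hstar : pvCell tile prow a = some '*'
    · by_cases hhole : pvHoleB (row + prow, col + a) = true
      · simp [cbpInner, hstar, hcell, hhole]
      · have hbf : pvHoleB (row + prow, col + a) = false := by
          cases h : pvHoleB (row + prow, col + a)
          · rfl
          · exact absurd h hhole
        have := ih (a + 1) (rt ++ [(row + prow, col + a)]) (by omega) (by omega)
        unfold pvRowBad pvRowCells at this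
        simp [cbpInner, hstar, hcell, hbf, this]
        simp only [hstar, hbf, beq_self_eq_true, Bool.true_and, Bool.false_or]
    · have hs : (pvCell tile prow a == some '*') = false := by simp [hstar]
      have := ih (a + 1) rt (by omega) (by omega)
      unfold pvRowBad pvRowCells at this
      simp [cbpInner, hstar, this]
      simp only [hs, Bool.false_and, Bool.false_or]

lemma pv_rows (tile : List String) (row col tw th : Int)
    (hr0 : 0 ≤ row) (hrt : row + th ≤ 7) (hc0 : 0 ≤ col) (hcw : col + tw ≤ 8) :
    ∀ (n : Nat) (a : Int) (rt : List (Int × Int)), 0 ≤ a → (th - a).toNat = n →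
    cbpRows pvBoard row col tile tw (PySem.List.pyRange a th 1) rt =
      if (PySem.List.pyRange a th 1).any (fun prow => pvRowBad tile row col prow tw 0) then none
      else some (rt ++ (PySem.List.pyRange a th 1).flatMap
        (fun prow => pvRowCells tile row col prow tw 0)) := by
  intro n
  induction n with
  | zero =>
    intro a rt ha h0
    have hle : th ≤ a := by omega
    simp [cbpRows, PySem.List.pyRange_one_eq_nil hle]
  | succ n ih =>
    intro a rt ha hn
    have hlt : a < th := by omega
    have hinner := pv_inner tile row col a tw (by omega) (by omega) hc0 hcw tw.toNat 0 rt
      le_rfl (by omega)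
    rw [PySem.List.pyRange_one_cons hlt]
    by_cases hbad : pvRowBad tile row col a tw 0 = true
    · simp [cbpRows, hinner, hbad]
    · have hbf : pvRowBad tile row col a tw 0 = false := by
        cases h : pvRowBad tile row col a tw 0
        · rfl
        · exact absurd h hbad
      have := ih (a + 1) (rt ++ pvRowCells tile row col a tw 0) (by omega) (by omega)
      simp [cbpRows, hinner, hbf, this]
      simp only [hbf, Bool.false_or]

-- the translated offsets list is exactly the row-major concatenation of the per-row cells
lemma pv_cells_eq (tile : List String) (row col th tw : Int) :
    (pvOffsets tile th tw).map (fun o => (row + o.1, col + o.2)) =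
      (PySem.List.pyRange 0 th 1).flatMap (fun prow => pvRowCells tile row col prow tw 0) := by
  unfold pvOffsets pvRowCells
  rw [List.map_flatMap]
  simp [List.map_map]
  rfl

-- disjointness with the hole set is exactly "no star lands on a hole"
lemma pv_disjoint_eq (tile : List String) (row col th tw : Int)
    (hr0 : 0 ≤ row) (hrt : row + th ≤ 7) (hc0 : 0 ≤ col) (hcw : col + tw ≤ 8) :
    PySem.Set.isdisjoint pvHoles
        ((pvOffsets tile th tw).map (fun o => (row + o.1, col + o.2))) =
      !((PySem.List.pyRange 0 th 1).any (fun prow => pvRowBad tile row col prow tw 0)) := by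
  cases hA : ((PySem.List.pyRange 0 th 1).any fun prow => pvRowBad tile row col prow tw 0) with
  | false =>
    simp only [Bool.not_false]
    rw [PySem.Set.isdisjoint_iff]
    intro x hx hxc
    rw [pv_mem_holes] at hx
    simp only [pvOffsets, List.mem_map, List.mem_flatMap, List.mem_filter,
      PySem.List.mem_pyRange_one] at hxc
    obtain ⟨o, ⟨pr, ⟨hpr0, hprth⟩, ⟨pc, ⟨⟨hpc0, hpctw⟩, hstar⟩, ho⟩⟩, hxo⟩ := hxc
    rw [List.any_eq_false] at hA
    refine hA pr (by rw [PySem.List.mem_pyRange_one]; exact ⟨hpr0, hprth⟩) ?_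
    unfold pvRowBad
    rw [List.any_eq_true]
    refine ⟨pc, by rw [PySem.List.mem_pyRange_one]; constructor <;> omega, ?_⟩
    subst ho
    simp only [← hxo] at hx ⊢
    simp only [hstar, Bool.true_and, pvHoleB]
    simp only [decide_eq_true_iff]
    exact ⟨hx.1, hx.2.1⟩
  | true =>
    simp only [Bool.not_true]
    rw [List.any_eq_true] at hA
    obtain ⟨pr, hpr, hbad⟩ := hA
    rw [PySem.List.mem_pyRange_one] at hpr
    unfold pvRowBad at hbad
    rw [List.any_eq_true] at hbad
    obtain ⟨pc, hpc, hit⟩ := hbad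
    rw [PySem.List.mem_pyRange_one] at hpc
    simp only [Bool.and_eq_true, beq_iff_eq, pvHoleB, decide_eq_true_iff] at hit
    obtain ⟨hstar, hr6, hc3⟩ := hit
    by_contra hd
    have hdt : PySem.Set.isdisjoint pvHoles
        ((pvOffsets tile th tw).map (fun o => (row + o.1, col + o.2))) = true := by
      cases h : PySem.Set.isdisjoint pvHoles
          ((pvOffsets tile th tw).map (fun o => (row + o.1, col + o.2)))
      · exact absurd h hd
      · rfl
    rw [PySem.Set.isdisjoint_iff] at hdt
    refine hdt (row + pr, col + pc) ?_ ?_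
    · rw [pv_mem_holes]
      refine ⟨hr6, hc3, by omega⟩
    · simp only [pvOffsets, List.mem_map, List.mem_flatMap, List.mem_filter,
        PySem.List.mem_pyRange_one]
      exact ⟨(pr, pc), ⟨pr, ⟨hpr.1, hpr.2⟩, pc, ⟨⟨hpc.1, hpc.2⟩, by simp [hstar]⟩, rfl⟩, rfl⟩

lemma pv_board_dims : pvBoardHeight = 7 ∧ pvBoardWidth = 8 := by decide

theorem find_all_placements_spec : Claim_equal_find_all_placements := by
  intro _type tile _dom _pre
  unfold Spec_find_all_placements
  unfold find_all_placements find_all_placements_alt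
  obtain ⟨hH, hW⟩ := pv_board_dims
  simp only [hH, hW]
  apply PySem.List.foldl_congr_mem
  intro acc row hrow
  apply PySem.List.foldl_congr_mem
  intro acc2 col hcol
  rw [PySem.List.mem_pyRange_one] at hrow hcol
  have hlen0 : (0:Int) ≤ PySem.List.len tile := by simp [PySem.List.len_eq]
  have hwid0 : (0:Int) ≤ PySem.Str.len ((PySem.List.pyGet? tile 0).getD "") := by
    simp [PySem.Str.len]
  have hrt : row + PySem.List.len tile ≤ 7 := by omega
  have hct : col + PySem.Str.len ((PySem.List.pyGet? tile 0).getD "") ≤ 8 := by omega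
  have hcbp := pv_rows tile row col (PySem.Str.len ((PySem.List.pyGet? tile 0).getD ""))
    (PySem.List.len tile) hrow.1 hrt hcol.1 hct (PySem.List.len tile).toNat 0 [] le_rfl
    (by omega)
  unfold can_be_placed
  rw [hcbp]
  rw [pv_disjoint_eq tile row col (PySem.List.len tile)
    (PySem.Str.len ((PySem.List.pyGet? tile 0).getD "")) hrow.1 hrt hcol.1 hct]
  cases hAB : ((PySem.List.pyRange 0 (PySem.List.len tile) 1).any fun prow =>
      pvRowBad tile row col prow (PySem.Str.len ((PySem.List.pyGet? tile 0).getD "")) 0) with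
  | true => simp
  | false => simp [pv_cells_eq]
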